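-- pv_equiv track=rewrite | github.com/Achuthan2909/INRC-2-Contextual-Bandits | src/schedule/penalty.py | _min_consec_violations
-- ===== SOURCE A (Python) =====
-- def _min_consec_violations(
--     active_seq: list[bool], c_hist: int, min_limit: int,
-- ) -> int:
--     """Count violation-days for falling below *min_limit* consecutive active days.
--
--     Border handling (Appendix B, Tables 7-8):
--       - Leading run from history: penalised when it ends within the week.
--       - Trailing run at end of week: NOT penalised (deferred to next stage).
--     """
--     violations = 0
--     running = c_hist
--
--     for active in active_seq:
--         if active:
--             running += 1
--         else:
--             if running > 0 and running < min_limit: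
--                 violations += min_limit - running
--             running = 0
--
--     # trailing run — deferred, no penalty
--     return violations
-- ===== SOURCE B (Python) =====
-- def _min_consec_violations(active_seq, c_hist, min_limit):
--     """Group the week into maximal runs first, then score each terminated run."""
--     runs = []
--     for a in active_seq:
--         if runs and runs[-1][0] == a:
--             runs[-1][1] += 1
--         else:
--             runs.append([a, 1])
--     total = 0
--     carry = c_hist
--     for j in range(len(runs)):
--         k, n = runs[j]
--         if k:
--             if j + 1 < len(runs) and 0 < carry + n < min_limit:
--                 total += min_limit - (carry + n)
--         elif 0 < carry < min_limit:
--             total += min_limit - carry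
--         carry = 0
--     return total
-- ===== Notes on version B (the rewrite author's own statement) =====
-- stated objective: alternative
-- what changed: B first compresses the sequence into maximal (value, run-length) groups and then scores each terminated run in a second pass with an explicit history carry, instead of A's single element-wise scan with a running counter.
import Mathlib
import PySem

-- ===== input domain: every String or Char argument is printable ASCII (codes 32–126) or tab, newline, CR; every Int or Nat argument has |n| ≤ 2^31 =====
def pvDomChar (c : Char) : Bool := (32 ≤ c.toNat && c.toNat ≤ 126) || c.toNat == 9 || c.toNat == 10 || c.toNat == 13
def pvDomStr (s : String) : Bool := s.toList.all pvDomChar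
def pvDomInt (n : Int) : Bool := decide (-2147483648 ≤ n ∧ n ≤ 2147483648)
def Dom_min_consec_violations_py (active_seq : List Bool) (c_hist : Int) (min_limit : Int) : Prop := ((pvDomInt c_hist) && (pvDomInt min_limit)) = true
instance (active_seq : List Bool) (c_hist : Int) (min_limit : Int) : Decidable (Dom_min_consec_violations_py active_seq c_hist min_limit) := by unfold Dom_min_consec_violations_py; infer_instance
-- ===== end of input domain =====

-- B groups the sequence into maximal runs first and scores each terminated run
-- in a second pass (alternative decomposition, same O(n) cost); return value only.

-- ===== PORT A =====
-- one step of A's loop: state = (violations, running)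
def pvStepA (min_limit : Int) (s : Int × Int) (active : Bool) : Int × Int :=
  if active then (s.1, s.2 + 1)
  else if 0 < s.2 ∧ s.2 < min_limit then (s.1 + (min_limit - s.2), 0) else (s.1, 0)

def min_consec_violations_py (active_seq : List Bool) (c_hist : Int) (min_limit : Int) : Int :=
  (active_seq.foldl (pvStepA min_limit) (0, c_hist)).1

-- ===== PORT B =====
-- build the maximal runs (value, length), front to back
def pvRunsAux (k : Bool) (n : Int) : List Bool → List (Bool × Int)
  | [] => [(k, n)]
  | x :: xs => if x = k then pvRunsAux k (n + 1) xs else (k, n) :: pvRunsAux x 1 xs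

def pvRuns : List Bool → List (Bool × Int)
  | [] => []
  | x :: xs => pvRunsAux x 1 xs

-- B's while loop over the runs: carry = history credit for the first run only
def pvAltLoop (min_limit : Int) : List (Bool × Int) → Int → Int → Int
  | [], _, total => total
  | (k, n) :: rest, carry, total =>
    pvAltLoop min_limit rest 0
      (if k then
        (if rest ≠ [] ∧ 0 < carry + n ∧ carry + n < min_limit
         then total + (min_limit - (carry + n)) else total)
       else if 0 < carry ∧ carry < min_limit then total + (min_limit - carry) else total)

def min_consec_violations_py_alt (active_seq : List Bool) (c_hist : Int) (min_limit : Int) : Int :=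
  pvAltLoop min_limit (pvRuns active_seq) c_hist 0

-- ===== PRECONDITION & SPEC =====
def Spec_min_consec_violations_py (active_seq : List Bool) (c_hist : Int) (min_limit : Int) (out : Int) : Prop := out = min_consec_violations_py_alt active_seq c_hist min_limit
instance (active_seq : List Bool) (c_hist : Int) (min_limit : Int) (out : Int) : Decidable (Spec_min_consec_violations_py active_seq c_hist min_limit out) := by unfold Spec_min_consec_violations_py; infer_instance

-- ===== CLAIM (what is proved, stated in full; the proofs are below) =====
def Claim_equal_min_consec_violations_py : Prop := ∀ (active_seq : List Bool) (c_hist : Int) (min_limit : Int), Dom_min_consec_violations_py active_seq c_hist min_limit → Spec_min_consec_violations_py active_seq c_hist min_limit (min_consec_violations_py active_seq c_hist min_limit)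

-- ===== LEMMAS AND PROOFS =====

-- penalty for a terminated run of length c (proof abbreviation)
def pvPen (m c : Int) : Int := if 0 < c ∧ c < m then m - c else 0

-- A's fold, with explicit accumulator
def pvArun (min_limit : Int) (xs : List Bool) (v r : Int) : Int :=
  (xs.foldl (pvStepA min_limit) (v, r)).1

theorem pvArun_nil (m v r : Int) : pvArun m [] v r = v := rfl

theorem pvArun_cons_true (m : Int) (xs : List Bool) (v r : Int) :
    pvArun m (true :: xs) v r = pvArun m xs v (r + 1) := by
  simp [pvArun, pvStepA]

theorem pvArun_cons_false (m : Int) (xs : List Bool) (v r : Int) :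
    pvArun m (false :: xs) v r = pvArun m xs (v + pvPen m r) 0 := by
  simp only [pvArun, List.foldl_cons, pvStepA, Bool.false_eq_true, if_false, pvPen]
  split_ifs <;> simp

theorem pvArun_add (m : Int) (xs : List Bool) (v r : Int) :
    pvArun m xs v r = v + pvArun m xs 0 r := by
  induction xs generalizing v r with
  | nil => simp [pvArun_nil]
  | cons x xs ih =>
    cases x with
    | false =>
      rw [pvArun_cons_false, pvArun_cons_false, ih, ih (0 + pvPen m r)]
      ring
    | true => rw [pvArun_cons_true, pvArun_cons_true, ih]

theorem pvArun_false_total (m : Int) (xs : List Bool) (r : Int) :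
    pvArun m (false :: xs) 0 r = pvPen m r + pvArun m xs 0 0 := by
  rw [pvArun_cons_false, pvArun_add]; ring

theorem pvPen_zero (m : Int) : pvPen m 0 = 0 := by simp [pvPen]

theorem pvAltLoop_add (m : Int) (gs : List (Bool × Int)) (carry t : Int) :
    pvAltLoop m gs carry t = t + pvAltLoop m gs carry 0 := by
  induction gs generalizing carry t with
  | nil => simp [pvAltLoop]
  | cons g gs ih =>
    obtain ⟨k, n⟩ := g
    rw [pvAltLoop, pvAltLoop, ih, ih (0 : Int) (if k then _ else _)]
    split_ifs <;> ring

theorem pvRunsAux_ne_nil (k : Bool) (n : Int) (xs : List Bool) :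
    pvRunsAux k n xs ≠ [] := by
  induction xs generalizing k n with
  | nil => simp [pvRunsAux]
  | cons x xs ih =>
    rw [pvRunsAux]
    split_ifs
    · exact ih _ _
    · simp

-- the key correspondence between A's scan and B's run loop
theorem pvMain (m : Int) (xs : List Bool) (k : Bool) (n carry : Int) :
    pvAltLoop m (pvRunsAux k n xs) carry 0
      = if k then pvArun m xs 0 (carry + n)
        else pvPen m carry + pvArun m xs 0 0 := by
  induction xs generalizing k n carry with
  | nil =>
    cases k with
    | false =>
      simp only [pvRunsAux, pvAltLoop, Bool.false_eq_true, if_false, pvArun_nil, pvPen]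
      split_ifs <;> ring
    | true =>
      simp [pvRunsAux, pvAltLoop, pvArun_nil]
  | cons x xs ih =>
    rw [pvRunsAux]
    by_cases hxk : x = k
    · subst hxk
      rw [if_pos rfl, ih]
      cases x with
      | false =>
        simp only [Bool.false_eq_true, if_false]
        rw [pvArun_false_total, pvPen_zero]
        ring
      | true =>
        rw [if_pos rfl, if_pos rfl, pvArun_cons_true]
        ring_nf
    · rw [if_neg hxk, pvAltLoop, pvAltLoop_add, ih]
      cases k with
      | false =>
        have hx : x = true := by cases x <;> simp_all
        subst hx
        simp only [Bool.false_eq_true, if_false]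
        rw [pvArun_cons_true]
        simp only [pvPen, zero_add]
        split_ifs <;> ring
      | true =>
        have hx : x = false := by cases x <;> simp_all
        subst hx
        rw [if_pos rfl]
        simp only [Bool.false_eq_true, if_false]
        rw [pvArun_false_total]
        have hne : pvRunsAux false 1 xs ≠ [] := pvRunsAux_ne_nil _ _ _
        simp only [hne, ne_eq, not_false_eq_true, true_and]
        rw [pvPen_zero]
        simp only [pvPen, zero_add]
        split_ifs <;> ring

-- ===== VERDICT (by name: the statement is the Claim_ definition above) =====
theorem min_consec_violations_py_spec : Claim_equal_min_consec_violations_py := by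
  intro active_seq c_hist min_limit _
  show min_consec_violations_py active_seq c_hist min_limit
      = min_consec_violations_py_alt active_seq c_hist min_limit
  cases active_seq with
  | nil => rfl
  | cons x xs =>
    unfold min_consec_violations_py min_consec_violations_py_alt pvRuns
    rw [pvMain]
    cases x with
    | false =>
      show pvArun min_limit (false :: xs) 0 c_hist = _
      rw [pvArun_false_total]
      simp
    | true =>
      show pvArun min_limit (true :: xs) 0 c_hist = _
      rw [pvArun_cons_true]
      simp
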